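-- pv_equiv track=rewrite | github.com/umr-ds/OPPLOAD | rhizome.py | fix_closures
-- ===== SOURCE A (Python) =====
-- def fix_closures(bundlestring):
--     brackets = 0
--     block = 0
--     for x in bundlestring:
--         if x == "{":
--             brackets += 1
--         elif x == "}":
--             brackets -= 1
--         if x == "[":
--             block += 1
--         if x == "]":
--             block -= 1
--     while block > 0:
--         bundlestring += "]"
--         block -= 1
--     while brackets > 0:
--         bundlestring += "}"
--         brackets -= 1
--
--     return bundlestring
-- ===== SOURCE B (Python) =====
-- def fix_closures(bundlestring):
--     # Divide and conquer: the bracket/brace imbalance of a string is the sum of the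
--     # imbalances of its two halves; recurse down to single characters.
--     def balance(s):
--         if len(s) == 0:
--             return (0, 0)
--         if len(s) == 1:
--             return ((s == "[") - (s == "]"), (s == "{") - (s == "}"))
--         mid = len(s) // 2
--         b1, r1 = balance(s[:mid])
--         b2, r2 = balance(s[mid:])
--         return (b1 + b2, r1 + r2)
--     block, brackets = balance(bundlestring)
--     return bundlestring + "]" * max(block, 0) + "}" * max(brackets, 0)
-- ===== Notes on version B (the rewrite author's own statement) =====
-- stated objective: alternative
-- what changed: Replaces A's single linear counter pass plus two while-append loops with a divide-and-conquer recursion that splits the string in half, computes each half's two imbalances recursively and sums them, then attaches the closing suffix by string multiplication in one expression.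
import Mathlib
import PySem

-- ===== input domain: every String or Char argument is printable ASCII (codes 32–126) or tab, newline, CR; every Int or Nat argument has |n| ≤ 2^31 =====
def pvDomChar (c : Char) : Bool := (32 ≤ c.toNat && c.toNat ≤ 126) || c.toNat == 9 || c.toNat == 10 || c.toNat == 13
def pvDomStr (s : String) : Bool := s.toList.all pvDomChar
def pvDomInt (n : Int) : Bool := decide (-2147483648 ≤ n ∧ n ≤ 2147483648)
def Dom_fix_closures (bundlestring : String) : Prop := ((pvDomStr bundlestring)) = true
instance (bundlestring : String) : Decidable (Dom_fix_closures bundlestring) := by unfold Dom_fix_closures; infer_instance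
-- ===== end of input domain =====

-- B replaces A's linear counter pass and while-append loops with a divide-and-conquer
-- recursion summing the imbalances of the two halves (objective: alternative).

-- ===== PORT A =====
-- the 'while n > 0: s += c; n -= 1' loop, one character per step
def pvAppendWhile (s : List Char) (c : Char) (n : Int) : List Char :=
  if n > 0 then pvAppendWhile (s ++ [c]) c (n - 1) else s
termination_by n.toNat
decreasing_by omega

def fix_closures (bundlestring : String) : String :=
  let st := bundlestring.toList.foldl
    (fun (p : Int × Int) x =>
      let brackets := if x == '{' then p.1 + 1 else if x == '}' then p.1 - 1 else p.1
      let block := if x == '[' then p.2 + 1 else if x == ']' then p.2 - 1 else p.2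
      (brackets, block))
    (0, 0)
  String.ofList (pvAppendWhile (pvAppendWhile bundlestring.toList ']' st.2) '}' st.1)

-- ===== PORT B =====
-- B's inner 'balance': divide and conquer on the half-split of the string
def pvBalance : List Char → Int × Int
  | [] => (0, 0)
  | [c] => ((if c = '[' then 1 else 0) - (if c = ']' then 1 else 0),
            (if c = '{' then 1 else 0) - (if c = '}' then 1 else 0))
  | c1 :: c2 :: rest =>
    let l := c1 :: c2 :: rest
    let mid := l.length / 2
    let p := pvBalance (l.take mid)
    let q := pvBalance (l.drop mid)
    (p.1 + q.1, p.2 + q.2)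
termination_by l => l.length
decreasing_by
  · simp only [List.length_take, List.length_cons]; omega
  · simp only [List.length_drop, List.length_cons]; omega

def fix_closures_alt (bundlestring : String) : String :=
  let p := pvBalance bundlestring.toList
  String.ofList (bundlestring.toList ++ List.replicate (max p.1 0).toNat ']'
                                     ++ List.replicate (max p.2 0).toNat '}')

-- ===== PRECONDITION & SPEC =====
def Spec_fix_closures (bundlestring : String) (out : String) : Prop := out = fix_closures_alt bundlestring
instance (bundlestring : String) (out : String) : Decidable (Spec_fix_closures bundlestring out) := by unfold Spec_fix_closures; infer_instance

-- ===== CLAIM (what is proved, stated in full; the proofs are below) =====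
def Claim_equal_fix_closures : Prop := ∀ (bundlestring : String), Dom_fix_closures bundlestring → Spec_fix_closures bundlestring (fix_closures bundlestring)

-- ===== LEMMAS AND PROOFS =====

theorem pvAppendWhile_eq (s : List Char) (c : Char) (n : Int) :
    pvAppendWhile s c n = s ++ List.replicate (max n 0).toNat c := by
  by_cases h : n > 0
  · rw [pvAppendWhile]
    have := pvAppendWhile_eq (s ++ [c]) c (n - 1)
    rw [if_pos h, this]
    have h1 : (max n 0).toNat = (max (n - 1) 0).toNat + 1 := by omega
    rw [h1, List.replicate_succ, List.append_assoc]
    rfl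
  · rw [pvAppendWhile, if_neg h]
    have : (max n 0).toNat = 0 := by omega
    simp [this]
termination_by n.toNat
decreasing_by omega

-- A's fold computes exactly the two count differences
theorem fold_eq_counts (l : List Char) (a b : Int) :
    l.foldl
      (fun (p : Int × Int) x =>
        let brackets := if x == '{' then p.1 + 1 else if x == '}' then p.1 - 1 else p.1
        let block := if x == '[' then p.2 + 1 else if x == ']' then p.2 - 1 else p.2
        (brackets, block))
      (a, b)
    = (a + (l.count '{' : Int) - (l.count '}' : Int),
       b + (l.count '[' : Int) - (l.count ']' : Int)) := by
  induction l generalizing a b with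
  | nil => simp
  | cons h t ih =>
    simp only [List.foldl_cons, ih, List.count_cons]
    by_cases h1 : h = '{' <;> by_cases h2 : h = '}' <;> by_cases h3 : h = '[' <;> by_cases h4 : h = ']' <;>
      simp_all [Prod.ext_iff] <;> omega

-- B's divide-and-conquer balance equals the two count differences
theorem pvBalance_eq (l : List Char) :
    pvBalance l = ((l.count '[' : Int) - (l.count ']' : Int),
                   (l.count '{' : Int) - (l.count '}' : Int)) := by
  match l with
  | [] => simp [pvBalance]
  | [c] =>
    simp only [pvBalance, List.count_cons, List.count_nil]
    by_cases h1 : c = '{' <;> by_cases h2 : c = '}' <;> by_cases h3 : c = '[' <;> by_cases h4 : c = ']' <;>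
      simp_all
  | c1 :: c2 :: rest =>
    have ih1 := pvBalance_eq ((c1 :: c2 :: rest).take ((c1 :: c2 :: rest).length / 2))
    have ih2 := pvBalance_eq ((c1 :: c2 :: rest).drop ((c1 :: c2 :: rest).length / 2))
    rw [pvBalance]
    simp only [ih1, ih2]
    conv_rhs => rw [(List.take_append_drop ((c1 :: c2 :: rest).length / 2) (c1 :: c2 :: rest)).symm]
    simp only [List.count_append, Prod.ext_iff]
    push_cast
    constructor <;> ring
termination_by l.length
decreasing_by
  · simp only [List.length_take, List.length_cons]; omega
  · simp only [List.length_drop, List.length_cons]; omega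

-- ===== VERDICT (by name: the statement is the Claim_ definition above) =====
theorem fix_closures_spec : Claim_equal_fix_closures := by
  intro s _
  unfold Spec_fix_closures fix_closures fix_closures_alt
  simp only [fold_eq_counts, pvBalance_eq]
  rw [pvAppendWhile_eq, pvAppendWhile_eq]
  simp [List.append_assoc]
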